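-- pv_equiv track=rewrite | github.com/phantatbach/SynFlow_Demonstration | SynFlow/Explorer/full_rel_explorer.py | _find_all_unique_paths
-- ===== SOURCE A (Python) =====
-- from typing import List, Tuple, Dict, Set, Optional
--
-- def _find_all_unique_paths(graph: Dict[int, List[int]], id2deprel: Dict[Tuple[int, int], str],
--                            tgt_id: int, max_path_depth: int) -> Set[str]:
--     """
--     Finds all unique paths in a dependency graph starting from a single target ID
--     up to a given maximum depth.
--
--     Args:
--         graph (dict): Adjacency list representation of the dependency graph.
--                       Keys are parent IDs, values are lists of child IDs.
--         id2deprel (dict): Maps (parent_id, child_id) tuple to dependency relation string.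
--         tgt_id (int): A single ID of the target token.
--         max_path_depth (int): Maximum depth of paths to search for.
--
--     Returns:
--         set: A set of strings, each representing a unique path found in the graph.
--              Each string is a sequence of dependency relations joined by ' > '.
--     """
--     out: Set[str] = set()
--     def dfs(node: int, depth: int, seen: Set[int], rel_path: List[str]):
--         if depth == max_path_depth:
--             out.add(" > ".join(rel_path))
--             return
--
--         has_child = False
--         for nb in graph.get(node, []):
--             if nb in seen:
--                 continue
--             lbl = id2deprel.get((node, nb))
--             if not lbl:
--                 continue
--             has_child = True
--             dfs(nb, depth + 1, seen | {nb}, rel_path + [lbl])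
--
--         if not has_child and rel_path:
--             out.add(" > ".join(rel_path))
--
--     dfs(tgt_id, 0, {tgt_id}, [])
--     return out
-- ===== SOURCE B (Python) =====
-- def _find_all_unique_paths(graph, id2deprel, tgt_id, max_path_depth):
--     """Pure bottom-up variant: instead of threading a growing rel_path prefix and a
--     mutable result set through the recursion, paths(node, depth, seen) returns the
--     list of label-suffixes of all maximal paths below node (in DFS order), built
--     back-to-front by prepending each edge label to its child's suffixes; the final
--     set is formed once at the top."""
--     def paths(node, depth, seen):
--         if depth == max_path_depth:
--             return [[]]
--         kids = [(nb, lbl) for nb in graph.get(node, [])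
--                 if nb not in seen and (lbl := id2deprel.get((node, nb)))]
--         if not kids:
--             return [[]] if depth > 0 else []
--         return [[lbl] + rest
--                 for (nb, lbl) in kids
--                 for rest in paths(nb, depth + 1, seen | {nb})]
--     return {" > ".join(p) for p in paths(tgt_id, 0, {tgt_id})}
-- ===== Notes on version B (the rewrite author's own statement) =====
-- stated objective: alternative
-- what changed: Replaces A's effectful DFS (mutable result set and a rel_path prefix threaded down the recursion) by a pure bottom-up recursion that returns each node's list of path suffixes, prepending edge labels to child results, with joining and deduplication done once at the top.
import Mathlib
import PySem

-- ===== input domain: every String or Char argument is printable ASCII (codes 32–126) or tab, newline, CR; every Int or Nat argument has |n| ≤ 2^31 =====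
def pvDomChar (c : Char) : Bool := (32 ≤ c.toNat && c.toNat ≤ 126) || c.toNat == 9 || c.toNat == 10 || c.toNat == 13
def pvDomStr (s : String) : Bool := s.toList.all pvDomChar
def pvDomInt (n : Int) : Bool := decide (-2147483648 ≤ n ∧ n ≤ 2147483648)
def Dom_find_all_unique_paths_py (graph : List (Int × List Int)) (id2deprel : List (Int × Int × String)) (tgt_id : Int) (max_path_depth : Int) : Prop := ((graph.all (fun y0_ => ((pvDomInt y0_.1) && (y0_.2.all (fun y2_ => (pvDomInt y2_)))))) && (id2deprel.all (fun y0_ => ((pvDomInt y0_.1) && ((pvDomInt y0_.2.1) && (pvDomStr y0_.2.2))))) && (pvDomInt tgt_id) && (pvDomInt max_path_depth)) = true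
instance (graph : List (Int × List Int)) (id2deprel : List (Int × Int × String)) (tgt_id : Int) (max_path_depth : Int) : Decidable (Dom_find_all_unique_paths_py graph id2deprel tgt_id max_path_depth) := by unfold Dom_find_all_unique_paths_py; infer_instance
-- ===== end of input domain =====

-- B replaces A's effectful DFS (mutable result set + rel_path prefix threaded down) by a pure
-- bottom-up recursion returning each node's list of path suffixes, joined and deduplicated once
-- at the top (objective: alternative decomposition, same asymptotic cost).

-- ===== shared basic helpers (the Python dict lookups; first match = dict key lookup) =====
def pvGraphGet (graph : List (Int × List Int)) (node : Int) : List Int :=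
  match graph.find? (fun e => e.1 == node) with
  | some e => e.2
  | none => []

def pvRelGet (id2deprel : List (Int × Int × String)) (node nb : Int) : Option String :=
  match id2deprel.find? (fun e => e.1 == node && e.2.1 == nb) with
  | some e => some e.2.2
  | none => none

-- termination infrastructure: both recursions only ever visit fresh nodes drawn from the
-- children occurring in `graph`, so the count of not-yet-seen such nodes decreases.
def pvUniv (graph : List (Int × List Int)) : List Int := (graph.map (·.2)).flatten

def pvMeas (graph : List (Int × List Int)) (seen : PySem.Set Int) : Nat :=
  ((pvUniv graph).filter (fun x => !(PySem.Set.contains seen x))).length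

lemma pvGraphGet_sub_univ (graph : List (Int × List Int)) (node : Int) :
    ∀ x ∈ pvGraphGet graph node, x ∈ pvUniv graph := by
  intro x hx
  unfold pvGraphGet at hx
  cases hfind : graph.find? (fun e => e.1 == node) with
  | none => simp [hfind] at hx
  | some e =>
    rw [hfind] at hx
    have he := List.mem_of_find?_eq_some hfind
    exact List.mem_flatten.2 ⟨e.2, List.mem_map.2 ⟨e, he, rfl⟩, hx⟩

lemma pv_filter_length_lt (l : List Int) (p q : Int → Bool) (a : Int) (h : ∀ x, q x = true → p x = true)
    (ha : a ∈ l) (hpa : p a = true) (hqa : q a = false) :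
    (l.filter q).length < (l.filter p).length := by
  induction l with
  | nil => simp at ha
  | cons x xs ih =>
    rcases List.mem_cons.1 ha with rfl | hx
    · simp only [List.filter_cons, hpa, hqa]
      have : (xs.filter q).length ≤ (xs.filter p).length :=
        List.Sublist.length_le (List.monotone_filter_right _ (by intro x hx; exact h x hx))
      simp; omega
    · have := ih hx
      by_cases hq : q x = true
      · simp [hq, h x hq]; omega
      · simp only [List.filter_cons, Bool.not_eq_true] at hq ⊢
        rw [hq]
        by_cases hp : p x = true <;> simp [hp] <;> omega

lemma pvMeas_lt (graph : List (Int × List Int)) (seen : PySem.Set Int) (nb : Int)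
    (h1 : nb ∈ pvUniv graph) (h2 : PySem.Set.contains seen nb = false) :
    pvMeas graph (PySem.Set.add seen nb) < pvMeas graph seen := by
  have h2' : nb ∉ seen := by simpa using h2
  unfold pvMeas
  refine pv_filter_length_lt _ _ _ nb ?_ h1 (by simpa using h2') ?_
  · intro x hx
    have hx' : x ∉ PySem.Set.add seen nb := by simpa using hx
    simpa using fun hmem => hx' ((PySem.Set.mem_add seen nb x).2 (Or.inl hmem))
  · simpa using (PySem.Set.mem_add seen nb nb).2 (Or.inr rfl)

-- ===== PORT A =====
mutual
def dfsA (graph : List (Int × List Int)) (id2deprel : List (Int × Int × String)) (max_path_depth : Int)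
    (node depth : Int) (seen : PySem.Set Int) (rel_path : List String) (out : PySem.Set String) : PySem.Set String :=
  if depth = max_path_depth then
    PySem.Set.add out (PySem.Str.join " > " rel_path)
  else
    let r := loopA graph id2deprel max_path_depth node depth seen rel_path false out
      (pvGraphGet graph node) (pvGraphGet_sub_univ graph node)
    if r.1 = false ∧ rel_path ≠ [] then PySem.Set.add r.2 (PySem.Str.join " > " rel_path) else r.2
termination_by (pvMeas graph seen, (pvGraphGet graph node).length + 1)
decreasing_by exact Prod.Lex.right _ (by omega)

-- the 'for nb in graph.get(node, [])' loop of dfs, threading (has_child, out);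
-- the proof argument hnbs only feeds the termination measure
def loopA (graph : List (Int × List Int)) (id2deprel : List (Int × Int × String)) (max_path_depth : Int)
    (node depth : Int) (seen : PySem.Set Int) (rel_path : List String) (has_child : Bool) (out : PySem.Set String)
    (nbs : List Int) (hnbs : ∀ x ∈ nbs, x ∈ pvUniv graph) : Bool × PySem.Set String :=
  match nbs, hnbs with
  | [], _ => (has_child, out)
  | nb :: rest, h =>
    if hs : PySem.Set.contains seen nb then
      loopA graph id2deprel max_path_depth node depth seen rel_path has_child out rest (fun x hx => h x (List.mem_cons_of_mem _ hx))
    else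
      match pvRelGet id2deprel node nb with
      | none => loopA graph id2deprel max_path_depth node depth seen rel_path has_child out rest (fun x hx => h x (List.mem_cons_of_mem _ hx))
      | some lbl =>
        if lbl = "" then
          loopA graph id2deprel max_path_depth node depth seen rel_path has_child out rest (fun x hx => h x (List.mem_cons_of_mem _ hx))
        else
          loopA graph id2deprel max_path_depth node depth seen rel_path true
            (dfsA graph id2deprel max_path_depth nb (depth + 1) (PySem.Set.add seen nb) (rel_path ++ [lbl]) out)
            rest (fun x hx => h x (List.mem_cons_of_mem _ hx))
termination_by (pvMeas graph seen, nbs.length)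
decreasing_by all_goals first
  | exact Prod.Lex.right _ (by simp)
  | exact Prod.Lex.left _ _ (pvMeas_lt graph seen nb (h nb (List.mem_cons_self)) (by simpa using hs))
end

def find_all_unique_paths_py (graph : List (Int × List Int)) (id2deprel : List (Int × Int × String)) (tgt_id : Int) (max_path_depth : Int) : List String :=
  dfsA graph id2deprel max_path_depth tgt_id 0 (PySem.Set.ofList [tgt_id]) [] PySem.Set.empty

-- ===== PORT B =====
-- the usable-children selector of Source B's kids comprehension
def pvSel (id2deprel : List (Int × Int × String)) (seen : PySem.Set Int) (node nb : Int) : Option (Int × String) :=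
  if PySem.Set.contains seen nb then none
  else match pvRelGet id2deprel node nb with
    | none => none
    | some lbl => if lbl = "" then none else some (nb, lbl)

def pvKids (graph : List (Int × List Int)) (id2deprel : List (Int × Int × String)) (seen : PySem.Set Int) (node : Int) : List (Int × String) :=
  (pvGraphGet graph node).filterMap (pvSel id2deprel seen node)

lemma pvKids_mem (graph : List (Int × List Int)) (id2deprel : List (Int × Int × String)) (seen : PySem.Set Int) (node : Int)
    (nbl : Int × String) (h : nbl ∈ pvKids graph id2deprel seen node) :
    nbl.1 ∈ pvUniv graph ∧ PySem.Set.contains seen nbl.1 = false := by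
  obtain ⟨nb, hnb, hsel⟩ := List.mem_filterMap.1 h
  unfold pvSel at hsel
  by_cases hs : PySem.Set.contains seen nb = true
  · rw [if_pos hs] at hsel; exact absurd hsel (by simp)
  · rw [if_neg hs] at hsel
    cases hrel : pvRelGet id2deprel node nb <;> rw [hrel] at hsel
    · exact absurd hsel (by simp)
    · rename_i lbl
      have hsel' : (if lbl = "" then none else some (nb, lbl)) = some nbl := hsel
      by_cases hl : lbl = ""
      · rw [if_pos hl] at hsel'; exact absurd hsel' (by simp)
      · rw [if_neg hl] at hsel'
        injection hsel' with he
        subst he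
        exact ⟨pvGraphGet_sub_univ graph node nb hnb, by simpa using hs⟩

def pathsB (graph : List (Int × List Int)) (id2deprel : List (Int × Int × String)) (max_path_depth : Int)
    (node depth : Int) (seen : PySem.Set Int) : List (List String) :=
  if depth = max_path_depth then [[]]
  else
    let kids := pvKids graph id2deprel seen node
    if kids.isEmpty then (if 0 < depth then [[]] else [])
    else kids.attach.flatMap (fun nbl =>
      (pathsB graph id2deprel max_path_depth nbl.1.1 (depth + 1) (PySem.Set.add seen nbl.1.1)).map
        (fun rest => nbl.1.2 :: rest))
termination_by pvMeas graph seen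
decreasing_by
  exact pvMeas_lt graph seen nbl.1.1 (pvKids_mem _ _ _ _ _ nbl.2).1 (pvKids_mem _ _ _ _ _ nbl.2).2

def find_all_unique_paths_py_alt (graph : List (Int × List Int)) (id2deprel : List (Int × Int × String)) (tgt_id : Int) (max_path_depth : Int) : List String :=
  PySem.Set.ofList
    ((pathsB graph id2deprel max_path_depth tgt_id 0 (PySem.Set.ofList [tgt_id])).map
      (fun p => PySem.Str.join " > " p))

-- ===== PRECONDITION & SPEC =====
def Spec_find_all_unique_paths_py (graph : List (Int × List Int)) (id2deprel : List (Int × Int × String)) (tgt_id : Int) (max_path_depth : Int) (out : List String) : Prop := out = find_all_unique_paths_py_alt graph id2deprel tgt_id max_path_depth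
instance (graph : List (Int × List Int)) (id2deprel : List (Int × Int × String)) (tgt_id : Int) (max_path_depth : Int) (out : List String) : Decidable (Spec_find_all_unique_paths_py graph id2deprel tgt_id max_path_depth out) := by unfold Spec_find_all_unique_paths_py; infer_instance

-- ===== CLAIM (what is proved, stated in full; the proofs are below) =====
def Claim_equal_find_all_unique_paths_py : Prop := ∀ (graph : List (Int × List Int)) (id2deprel : List (Int × Int × String)) (tgt_id : Int) (max_path_depth : Int), Dom_find_all_unique_paths_py graph id2deprel tgt_id max_path_depth → Spec_find_all_unique_paths_py graph id2deprel tgt_id max_path_depth (find_all_unique_paths_py graph id2deprel tgt_id max_path_depth)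

-- ===== LEMMAS AND PROOFS =====
lemma pv_main (graph : List (Int × List Int)) (id2deprel : List (Int × Int × String)) (mpd : Int) :
    ∀ (k : Nat) (seen : PySem.Set Int) (node depth : Int) (rel_path : List String) (out : PySem.Set String),
      pvMeas graph seen ≤ k → depth = (rel_path.length : Int) →
      dfsA graph id2deprel mpd node depth seen rel_path out
        = (pathsB graph id2deprel mpd node depth seen).foldl
            (fun o p => PySem.Set.add o (PySem.Str.join " > " (rel_path ++ p))) out := by
  intro k
  induction k using Nat.strong_induction_on with
  | _ k IH =>
  intro seen node depth rel_path out hk hd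
  rw [dfsA.eq_def, pathsB.eq_def]
  by_cases hmax : depth = mpd
  · rw [if_pos hmax, if_pos hmax]
    simp
  · rw [if_neg hmax, if_neg hmax]
    have loopEq : ∀ (nbs : List Int) (hnbs : ∀ x ∈ nbs, x ∈ pvUniv graph) (hc : Bool) (o : PySem.Set String),
        loopA graph id2deprel mpd node depth seen rel_path hc o nbs hnbs
          = (hc || !(nbs.filterMap (pvSel id2deprel seen node)).isEmpty,
             (nbs.filterMap (pvSel id2deprel seen node)).foldl
               (fun o nbl =>
                 (pathsB graph id2deprel mpd nbl.1 (depth + 1) (PySem.Set.add seen nbl.1)).foldl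
                   (fun o p => PySem.Set.add o (PySem.Str.join " > " (rel_path ++ nbl.2 :: p))) o) o) := by
      intro nbs
      induction nbs with
      | nil => intro hnbs hc o; rw [loopA.eq_def]; simp
      | cons nb rest ihr =>
        intro hnbs hc o
        rw [loopA.eq_def]
        simp only [List.filterMap_cons]
        by_cases hs : PySem.Set.contains seen nb = true
        · rw [dif_pos hs]
          have hsel : pvSel id2deprel seen node nb = none := by unfold pvSel; rw [if_pos hs]
          rw [hsel, ihr _ hc o]
        · rw [dif_neg hs]
          have hsel0 : pvSel id2deprel seen node nb
              = match pvRelGet id2deprel node nb with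
                | none => none
                | some lbl => if lbl = "" then none else some (nb, lbl) := by
            unfold pvSel; rw [if_neg hs]
          cases hrel : pvRelGet id2deprel node nb with
          | none =>
            simp only [hsel0, hrel]
            exact ihr _ hc o
          | some lbl =>
            simp only [hsel0, hrel]
            by_cases hl : lbl = ""
            · rw [if_pos hl, if_pos hl]
              exact ihr _ hc o
            · rw [if_neg hl, if_neg hl]
              have hnbU : nb ∈ pvUniv graph := hnbs nb List.mem_cons_self
              have hlt : pvMeas graph (PySem.Set.add seen nb) < k :=
                lt_of_lt_of_le (pvMeas_lt graph seen nb hnbU (by simpa using hs)) hk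
              have hdfs := IH (pvMeas graph (PySem.Set.add seen nb)) hlt
                (PySem.Set.add seen nb) nb (depth + 1) (rel_path ++ [lbl]) o le_rfl
                (by rw [hd]; simp)
              rw [hdfs, ihr _ true _]
              simp only [List.foldl_cons, List.append_assoc, List.singleton_append,
                Bool.true_or]
              simp
    rw [loopEq]
    have hkidsEq : (pvGraphGet graph node).filterMap (pvSel id2deprel seen node)
        = pvKids graph id2deprel seen node := rfl
    rw [hkidsEq]
    cases hkids : (pvKids graph id2deprel seen node).isEmpty with
    | true =>
      have hnil : pvKids graph id2deprel seen node = [] := List.isEmpty_iff.1 hkids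
      rw [hnil]
      simp only [List.foldl_nil, List.isEmpty_nil, if_pos rfl]
      by_cases hrp : rel_path = []
      · have hd0 : ¬ (0 : Int) < depth := by rw [hd, hrp]; simp
        rw [if_neg (by simp [hrp]), if_neg hd0]
        simp
      · have hd0 : (0 : Int) < depth := by
          rw [hd]
          have : rel_path.length ≠ 0 := by simpa using hrp
          omega
        rw [if_pos ⟨rfl, hrp⟩, if_pos hd0]
        simp
    | false =>
      have hflat : (pvKids graph id2deprel seen node).attach.flatMap
          (fun nbl => (pathsB graph id2deprel mpd nbl.1.1 (depth + 1) (PySem.Set.add seen nbl.1.1)).map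
            (fun rest => nbl.1.2 :: rest))
          = (pvKids graph id2deprel seen node).flatMap
            (fun nbl => (pathsB graph id2deprel mpd nbl.1 (depth + 1) (PySem.Set.add seen nbl.1)).map
              (fun rest => nbl.2 :: rest)) := by
        simp only [List.flatMap_subtype, List.unattach_attach]
      have hne : pvKids graph id2deprel seen node ≠ [] := by simpa using hkids
      simp only [Bool.not_false, Bool.or_true, hflat]
      rw [hkids, if_neg (show ¬(true = false ∧ rel_path ≠ []) by simp)]
      rw [if_neg (show ¬(false = true) by simp), List.foldl_flatMap]
      simp only [List.foldl_map]

-- ===== VERDICT (by name: the statement is the Claim_ definition above) =====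
theorem find_all_unique_paths_py_spec : Claim_equal_find_all_unique_paths_py := by
  intro graph id2deprel tgt_id max_path_depth _
  unfold Spec_find_all_unique_paths_py find_all_unique_paths_py find_all_unique_paths_py_alt
  rw [pv_main graph id2deprel max_path_depth (pvMeas graph (PySem.Set.ofList [tgt_id])) _ _ _ _ _ le_rfl (by simp)]
  conv_rhs => rw [PySem.Set.ofList_eq_foldl, List.foldl_map]
  simp
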